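-- pv_equiv track=rewrite | github.com/rgag/squad_selector | hockey_planner.py | would_violate_bench_together
-- ===== SOURCE A (Python) =====
-- from typing import Optional
--
-- def would_violate_bench_together(
--     going_off: str,
--     going_on: Optional[str],
--     on_bench: list[str],
--     never_bench_together: list[frozenset],
-- ) -> bool:
--     new_bench = (set(on_bench) | {going_off}) - ({going_on} if going_on else set())
--     return any(pair.issubset(new_bench) for pair in never_bench_together)
-- ===== SOURCE B (Python) =====
-- def would_violate_bench_together(going_off, going_on, on_bench, never_bench_together):
--     # Counting scheme: each forbidden pair gets a counter of members still missing
--     # from the new bench; every effective new-bench occupant decrements the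
--     # counters of the pairs it belongs to; a counter at zero marks a violation.
--     need = [len(pair) for pair in never_bench_together]
--     for p in dict.fromkeys(on_bench + [going_off]):
--         if going_on and p == going_on:
--             continue
--         need = [n - (1 if p in pair else 0)
--                 for n, pair in zip(need, never_bench_together)]
--     return 0 in need
-- ===== Notes on version B (the rewrite author's own statement) =====
-- stated objective: alternative
-- what changed: B replaces A's build-the-new-bench-set-then-subset-test-per-pair with a counting algorithm: a missing-members counter per forbidden pair, decremented by each effective new-bench occupant (outer loop over players, inner over pairs), violation iff some counter reaches zero.
import Mathlib
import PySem

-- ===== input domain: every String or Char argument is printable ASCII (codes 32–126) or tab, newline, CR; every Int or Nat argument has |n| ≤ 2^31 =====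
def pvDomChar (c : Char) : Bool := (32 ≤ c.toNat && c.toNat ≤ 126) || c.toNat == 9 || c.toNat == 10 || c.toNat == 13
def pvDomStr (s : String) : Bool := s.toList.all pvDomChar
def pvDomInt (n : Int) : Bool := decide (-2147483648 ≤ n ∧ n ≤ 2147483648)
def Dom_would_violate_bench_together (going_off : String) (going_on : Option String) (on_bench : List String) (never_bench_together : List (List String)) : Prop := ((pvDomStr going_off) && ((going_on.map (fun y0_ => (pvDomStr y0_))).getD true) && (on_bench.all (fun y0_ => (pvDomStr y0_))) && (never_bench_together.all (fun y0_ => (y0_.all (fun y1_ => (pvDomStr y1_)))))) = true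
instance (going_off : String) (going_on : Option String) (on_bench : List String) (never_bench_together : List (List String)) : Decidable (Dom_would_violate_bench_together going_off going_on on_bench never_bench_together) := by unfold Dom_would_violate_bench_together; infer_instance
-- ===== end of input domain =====

-- B replaces the build-a-set-then-subset-test with a counting scheme (a missing-members
-- counter per forbidden pair, decremented by each effective bench occupant): a different
-- algorithm with the reversed traversal order, not claimed faster.
-- ===== PORT A =====
def would_violate_bench_together (going_off : String) (going_on : Option String) (on_bench : List String) (never_bench_together : List (List String)) : Bool :=
  let new_bench : PySem.Set String :=
    PySem.Set.diff (PySem.Set.union (PySem.Set.ofList on_bench) [going_off])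
      (match going_on with
        | some s => if s ≠ "" then PySem.Set.ofList [s] else PySem.Set.empty
        | none => PySem.Set.empty)
  never_bench_together.any (fun pair => PySem.Set.issubset (PySem.Set.ofList pair) new_bench)

-- ===== PORT B =====
-- the truthiness test 'going_on and p == going_on' of Source B
def pvSkip (going_on : Option String) (p : String) : Bool :=
  match going_on with | some s => decide (s ≠ "") && (p == s) | none => false

def would_violate_bench_together_alt (going_off : String) (going_on : Option String) (on_bench : List String) (never_bench_together : List (List String)) : Bool :=
  -- need = [len(pair) for pair in never_bench_together]   (len of a frozenset = number of distinct members)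
  let need0 : List Int := never_bench_together.map (fun pair => ((PySem.Set.ofList pair).length : Int))
  -- for p in dict.fromkeys(on_bench + [going_off]): … need = [n - (1 if p in pair else 0) for n, pair in zip(…)]
  let need : List Int :=
    (PySem.List.dedup (on_bench ++ [going_off])).foldl
      (fun need p =>
        if pvSkip going_on p then need
        else (need.zip never_bench_together).map
          (fun q => q.1 - (if q.2.contains p then 1 else 0)))
      need0
  need.contains 0

-- ===== PRECONDITION & SPEC =====
def Spec_would_violate_bench_together (going_off : String) (going_on : Option String) (on_bench : List String) (never_bench_together : List (List String)) (out : Bool) : Prop := out = would_violate_bench_together_alt going_off going_on on_bench never_bench_together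
instance (going_off : String) (going_on : Option String) (on_bench : List String) (never_bench_together : List (List String)) (out : Bool) : Decidable (Spec_would_violate_bench_together going_off going_on on_bench never_bench_together out) := by unfold Spec_would_violate_bench_together; infer_instance

-- ===== CLAIM =====
def Claim_equal_would_violate_bench_together : Prop := ∀ (going_off : String) (going_on : Option String) (on_bench : List String) (never_bench_together : List (List String)), Dom_would_violate_bench_together going_off going_on on_bench never_bench_together → Spec_would_violate_bench_together going_off going_on on_bench never_bench_together (would_violate_bench_together going_off going_on on_bench never_bench_together)

-- ===== LEMMAS AND PROOFS =====

-- zip of a mapped list with itself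
theorem pv_zip_map_self {α β : Type} (f : α → β) (l : List α) :
    (l.map f).zip l = l.map (fun x => (f x, x)) := by
  induction l with
  | nil => rfl
  | cons a t ih => simp [ih]

-- shape of B's decrement loop: starting from pairs.map c, the state stays a map over pairs
theorem pv_fold_shape (going_on : Option String) (pairs : List (List String)) :
    ∀ (L : List String) (c : List String → Int),
      L.foldl
        (fun need p =>
          if pvSkip going_on p then need
          else (need.zip pairs).map (fun q => q.1 - (if q.2.contains p then 1 else 0)))
        (pairs.map c)
      = pairs.map (fun pr =>
          c pr - ((L.filter (fun p => !pvSkip going_on p && pr.contains p)).length : Int)) := by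
  intro L
  induction L with
  | nil => intro c; simp
  | cons p L ih =>
      intro c
      by_cases h : pvSkip going_on p = true
      · rw [List.foldl_cons, if_pos h, ih c]
        simp [h]
      · rw [List.foldl_cons, if_neg h, pv_zip_map_self, List.map_map, ih]
        apply List.map_congr_left
        intro pr _
        simp only [Function.comp, List.filter_cons]
        have h' : pvSkip going_on p = false := by simpa using h
        by_cases hc : p ∈ pr
        · simp [hc, h']; ring
        · simp [hc]

-- membership in A's new bench
theorem pv_mem_new_bench (going_off : String) (going_on : Option String) (on_bench : List String) (x : String) :
    (x ∈ PySem.Set.diff (PySem.Set.union (PySem.Set.ofList on_bench) [going_off])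
        (match going_on with
          | some s => if s ≠ "" then PySem.Set.ofList [s] else PySem.Set.empty
          | none => PySem.Set.empty))
      ↔ ((x ∈ on_bench ∨ x = going_off) ∧ pvSkip going_on x = false) := by
  cases going_on with
  | none =>
      simp [pvSkip, PySem.Set.mem_diff, PySem.Set.mem_union, PySem.Set.mem_ofList, PySem.Set.empty]
  | some s =>
      by_cases hs : s = ""
      · subst hs
        simp [pvSkip, PySem.Set.mem_diff, PySem.Set.mem_union, PySem.Set.mem_ofList, PySem.Set.empty]
      · by_cases hx : x = s
        · simp [pvSkip, hs, hx, PySem.Set.mem_diff, PySem.Set.mem_union, PySem.Set.mem_ofList]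
        · simp [pvSkip, hs, hx, PySem.Set.mem_diff, PySem.Set.mem_union, PySem.Set.mem_ofList]

-- the per-pair counter reaches 0 exactly when the pair is contained in the new bench
theorem pv_count_zero_iff (going_off : String) (going_on : Option String) (on_bench : List String) (pr : List String) :
    (((PySem.Set.ofList pr).length : Int)
        - (((PySem.List.dedup (on_bench ++ [going_off])).filter
            (fun p => !pvSkip going_on p && pr.contains p)).length : Int) = 0)
      ↔ (∀ x ∈ pr, (x ∈ on_bench ∨ x = going_off) ∧ pvSkip going_on x = false) := by
  set L := PySem.List.dedup (on_bench ++ [going_off]) with hL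
  set F := L.filter (fun p => !pvSkip going_on p && pr.contains p) with hF
  have hLnd : L.Nodup := by
    rw [hL]; simpa using PySem.Set.nodup_ofList (on_bench ++ [going_off])
  have hFnd : F.Nodup := hLnd.filter _
  have hSnd : (PySem.Set.ofList pr).Nodup := PySem.Set.nodup_ofList pr
  have hmemF : ∀ x, x ∈ F ↔ (x ∈ pr ∧ (x ∈ on_bench ∨ x = going_off) ∧ pvSkip going_on x = false) := by
    intro x
    rw [hF, List.mem_filter]
    constructor
    · rintro ⟨hxL, hcond⟩
      simp only [Bool.and_eq_true, Bool.not_eq_true'] at hcond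
      have hxm : x ∈ on_bench ∨ x = going_off := by
        have := (PySem.List.mem_dedup (xs := on_bench ++ [going_off]) (x := x)).mp (hL ▸ hxL)
        simp at this
        exact this
      refine ⟨by simpa using hcond.2, hxm, hcond.1⟩
    · rintro ⟨hxpr, hxm, hsk⟩
      refine ⟨?_, ?_⟩
      · rw [hL, PySem.List.mem_dedup]; simpa using hxm
      · simp [hsk, hxpr]
  have hcardF : F.length = F.toFinset.card := (List.toFinset_card_of_nodup hFnd).symm
  have hcardS : (PySem.Set.ofList pr).length = pr.toFinset.card := by
    rw [← List.toFinset_card_of_nodup hSnd]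
    congr 1
    ext x
    simp [PySem.Set.mem_ofList]
  have hsub : F.toFinset ⊆ pr.toFinset := by
    intro x hx
    rw [List.mem_toFinset] at hx ⊢
    exact ((hmemF x).mp hx).1
  constructor
  · intro h
    have hcard : pr.toFinset.card = F.toFinset.card := by
      rw [← hcardS, ← hcardF]; omega
    have heq : F.toFinset = pr.toFinset :=
      Finset.eq_of_subset_of_card_le hsub (le_of_eq hcard)
    intro x hx
    have : x ∈ F.toFinset := by rw [heq, List.mem_toFinset]; exact hx
    rw [List.mem_toFinset] at this
    exact ((hmemF x).mp this).2
  · intro h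
    have heq : F.toFinset = pr.toFinset := by
      apply Finset.Subset.antisymm hsub
      intro x hx
      rw [List.mem_toFinset] at hx ⊢
      exact (hmemF x).mpr ⟨hx, h x hx⟩
    rw [hcardS, hcardF, heq]
    omega

-- ===== VERDICT =====
theorem would_violate_bench_together_spec : Claim_equal_would_violate_bench_together := by
  intro going_off going_on on_bench never_bench_together _
  unfold Spec_would_violate_bench_together
  simp only [would_violate_bench_together, would_violate_bench_together_alt]
  rw [pv_fold_shape going_on never_bench_together (PySem.List.dedup (on_bench ++ [going_off]))]
  rw [Bool.eq_iff_iff, List.any_eq_true]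
  constructor
  · rintro ⟨pr, hpr, hsub⟩
    have hall : ∀ x ∈ pr, (x ∈ on_bench ∨ x = going_off) ∧ pvSkip going_on x = false := by
      intro x hx
      have := (PySem.Set.issubset_iff _ _).mp hsub x (by simpa [PySem.Set.mem_ofList] using hx)
      exact (pv_mem_new_bench going_off going_on on_bench x).mp this
    have h0 := (pv_count_zero_iff going_off going_on on_bench pr).mpr hall
    rw [List.contains_iff_mem, List.mem_map]
    exact ⟨pr, hpr, by omega⟩
  · intro h
    rw [List.contains_iff_mem, List.mem_map] at h
    obtain ⟨pr, hpr, h0⟩ := h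
    have hall := (pv_count_zero_iff going_off going_on on_bench pr).mp (by omega)
    refine ⟨pr, hpr, ?_⟩
    rw [PySem.Set.issubset_iff]
    intro x hx
    exact (pv_mem_new_bench going_off going_on on_bench x).mpr
      (hall x (by simpa [PySem.Set.mem_ofList] using hx))
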